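-- pv_equiv track=rewrite | github.com/userdefault13/Aseprite-Mappie | src/tilemap_generator/paint_map_png.py | _hill_reachable_without_cell
-- ===== SOURCE A (Python) =====
-- def is_hill_char(
--     ascii_lines: list[str],
--     x: int,
--     y: int,
--     hill_char: str = "I",
-- ) -> bool:
--     height = len(ascii_lines)
--     width = max(len(row) for row in ascii_lines) if ascii_lines else 0
--     if y < 0 or y >= height or x < 0 or x >= width:
--         return False
--     row = ascii_lines[y]
--     ch = row.ljust(width, ".")[x]
--     return ch == hill_char
--
-- def _hill_reachable_without_cell(
--     ascii_lines: list[str],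
--     start: tuple[int, int],
--     blocked: tuple[int, int],
--     hill_char: str = "I",
-- ) -> set[tuple[int, int]]:
--     """4-connected flood fill over I cells from start, not stepping on blocked."""
--     height = len(ascii_lines)
--     width = max(len(row) for row in ascii_lines) if ascii_lines else 0
--     bx, by = blocked
--     seen: set[tuple[int, int]] = set()
--     stack = [start]
--     while stack:
--         cx, cy = stack.pop()
--         if (cx, cy) in seen:
--             continue
--         if cx == bx and cy == by:
--             continue
--         if not is_hill_char(ascii_lines, cx, cy, hill_char):
--             continue
--         seen.add((cx, cy))
--         for dx, dy in ((0, -1), (1, 0), (0, 1), (-1, 0)):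
--             nx, ny = cx + dx, cy + dy
--             if 0 <= nx < width and 0 <= ny < height:
--                 stack.append((nx, ny))
--     return seen
-- ===== SOURCE B (Python) =====
-- def _hill_reachable_without_cell(
--     ascii_lines,
--     start,
--     blocked,
--     hill_char="I",
-- ):
--     """Recursive 4-connected flood fill over hill cells from start, skipping blocked."""
--     height = len(ascii_lines)
--     width = max((len(row) for row in ascii_lines), default=0)
--     seen = set()
--
--     def hill(x, y):
--         if 0 <= y < height and 0 <= x < width:
--             row = ascii_lines[y]
--             ch = row[x] if x < len(row) else "."
--             return ch == hill_char
--         return False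
--
--     def visit(x, y):
--         if (x, y) in seen or (x, y) == blocked or not hill(x, y):
--             return
--         seen.add((x, y))
--         visit(x - 1, y)
--         visit(x, y + 1)
--         visit(x + 1, y)
--         visit(x, y - 1)
--
--     visit(*start)
--     return seen
-- ===== Notes on version B (the rewrite author's own statement) =====
-- stated objective: alternative
-- what changed: Replaces A's explicit-stack DFS loop (with per-cell calls to the module-level is_hill_char, which recomputes the grid width every call) by a recursive flood-fill helper visit(x, y) closing over seen, blocked and a once-precomputed width/height hill test, recursing on the four neighbours.
import Mathlib
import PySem

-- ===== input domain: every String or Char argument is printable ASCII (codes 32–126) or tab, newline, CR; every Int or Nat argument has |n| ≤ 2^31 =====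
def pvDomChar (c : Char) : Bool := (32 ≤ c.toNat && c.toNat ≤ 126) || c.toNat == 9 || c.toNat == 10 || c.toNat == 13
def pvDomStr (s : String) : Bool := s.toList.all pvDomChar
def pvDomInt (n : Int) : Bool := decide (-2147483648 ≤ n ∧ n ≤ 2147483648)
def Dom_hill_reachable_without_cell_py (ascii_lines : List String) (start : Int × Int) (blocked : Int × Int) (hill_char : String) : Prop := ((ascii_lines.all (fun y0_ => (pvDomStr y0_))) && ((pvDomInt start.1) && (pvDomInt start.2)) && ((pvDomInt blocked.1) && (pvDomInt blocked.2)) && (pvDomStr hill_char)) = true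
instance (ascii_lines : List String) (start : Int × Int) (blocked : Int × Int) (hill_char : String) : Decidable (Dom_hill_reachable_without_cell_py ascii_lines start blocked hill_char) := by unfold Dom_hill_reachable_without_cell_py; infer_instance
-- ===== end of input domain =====

-- B replaces A's explicit-stack DFS by a recursive flood fill (recursion on the four
-- neighbours, bounds checked inside the hill test); same return value, objective: alternative.

-- ===== PORT A =====
-- width = max(len(row) for row in ascii_lines) if ascii_lines else 0
def pvWidthA (ascii_lines : List String) : Int :=
  match PySem.List.max? (ascii_lines.map (fun row => PySem.Str.len row)) (fun y => y) with
  | some m => m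
  | none => 0

-- port of the module helper is_hill_char (ljust ported by hand on List Char: exact, since
-- row ++ replicate (width.toNat - row.length) '.' is row.ljust(width, ".") for 0 ≤ width)
def is_hill_char_py (ascii_lines : List String) (x y : Int) (hill_char : String) : Bool :=
  let height : Int := (ascii_lines.length : Int)
  let width : Int := pvWidthA ascii_lines
  if y < 0 || y ≥ height || x < 0 || x ≥ width then false
  else
    let row := ((PySem.List.pyGet? ascii_lines y).getD "").toList
    let padded := row ++ List.replicate (width.toNat - row.length) '.'
    match PySem.List.pyGet? padded x with
    | some ch => hill_char.toList == [ch]   -- ch == hill_char (1-char string equality)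
    | none => false                          -- unreachable: 0 ≤ x < width ≤ padded.length

-- measure for the while-loop's termination (proof device, not part of A's code):
-- the in-bounds hill cells not yet in seen
def pvAllCells (ascii_lines : List String) : List (Int × Int) :=
  (List.range ascii_lines.length).flatMap
    (fun y => (List.range (pvWidthA ascii_lines).toNat).map (fun x => (Int.ofNat x, Int.ofNat y)))

def pvHillCells (ascii_lines : List String) (hill_char : String) : List (Int × Int) :=
  (pvAllCells ascii_lines).filter (fun c => is_hill_char_py ascii_lines c.1 c.2 hill_char)

def pvMu (ascii_lines : List String) (hill_char : String) (seen : List (Int × Int)) : Nat :=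
  (pvHillCells ascii_lines hill_char).countP (fun a => !(List.elem a seen))

lemma pvCountP_append_lt (l s : List (Int × Int)) (c : Int × Int)
    (hcl : c ∈ l) (hcs : c ∉ s) :
    l.countP (fun a => !(List.elem a (s ++ [c]))) < l.countP (fun a => !(List.elem a s)) := by
  have base : l.countP (fun a => decide (a ∉ s ++ [c])) < l.countP (fun a => decide (a ∉ s)) := by
    induction l with
    | nil => cases hcl
    | cons a t ih =>
      have hmono : t.countP (fun a => decide (a ∉ s ++ [c])) ≤ t.countP (fun a => decide (a ∉ s)) := by
        apply List.countP_mono_left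
        intro x _ hx
        simp only [decide_eq_true_eq, List.mem_append, not_or] at hx ⊢
        exact hx.1
      rw [List.countP_cons, List.countP_cons]
      by_cases hac : a = c
      · have h1 : (decide (a ∉ s ++ [c])) = false := by simp [hac]
        have h2 : (decide (a ∉ s)) = true := by simp [hac ▸ hcs]
        rw [h1, h2]
        simp
        simp at hmono
        omega
      · have h3 : (decide (a ∉ s ++ [c])) = (decide (a ∉ s)) := by simp [hac]
        rw [h3]
        have hct : c ∈ t := by cases hcl with | head => exact absurd rfl hac | tail _ h => exact h
        have := ih hct
        omega
  simpa using base

lemma is_hill_bounds (ascii_lines : List String) (x y : Int) (hill_char : String)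
    (h : is_hill_char_py ascii_lines x y hill_char = true) :
    0 ≤ x ∧ x < pvWidthA ascii_lines ∧ 0 ≤ y ∧ y < (ascii_lines.length : Int) := by
  unfold is_hill_char_py at h
  by_cases hb : (y < 0 || y ≥ (ascii_lines.length : Int) || x < 0 || x ≥ pvWidthA ascii_lines) = true
  · simp only [hb, if_true] at h; cases h
  · simp only [Bool.or_eq_true, decide_eq_true_eq, not_or] at hb
    push_neg at hb
    omega

lemma mem_hillCells_of_is_hill (ascii_lines : List String) (c : Int × Int) (hill_char : String)
    (h : is_hill_char_py ascii_lines c.1 c.2 hill_char = true) :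
    c ∈ pvHillCells ascii_lines hill_char := by
  obtain ⟨hx0, hxw, hy0, hyh⟩ := is_hill_bounds ascii_lines c.1 c.2 hill_char h
  have hy : c.2.toNat ∈ List.range ascii_lines.length := List.mem_range.mpr (by omega)
  have hx : c.1.toNat ∈ List.range (pvWidthA ascii_lines).toNat := List.mem_range.mpr (by omega)
  have hmem : c ∈ pvAllCells ascii_lines := by
    refine List.mem_flatMap.mpr ⟨c.2.toNat, hy, List.mem_map.mpr ⟨c.1.toNat, hx, ?_⟩⟩
    have h1 : Int.ofNat c.1.toNat = c.1 := Int.toNat_of_nonneg hx0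
    have h2 : Int.ofNat c.2.toNat = c.2 := Int.toNat_of_nonneg hy0
    rw [h1, h2]
  simp [pvHillCells, List.mem_filter, hmem, h]

lemma pvMu_add_lt (ascii_lines : List String) (hill_char : String) (seen : List (Int × Int))
    (c : Int × Int) (hh : is_hill_char_py ascii_lines c.1 c.2 hill_char = true)
    (hns : PySem.Set.contains seen c = false) :
    pvMu ascii_lines hill_char (PySem.Set.add seen c) < pvMu ascii_lines hill_char seen := by
  have hcs : c ∉ seen := by
    intro hmem
    have := PySem.Set.contains_iff (s := seen) (x := c) |>.mpr hmem
    rw [hns] at this; cases this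
  rw [PySem.Set.add_of_not_mem hcs]
  unfold pvMu
  exact pvCountP_append_lt _ seen c (mem_hillCells_of_is_hill ascii_lines c hill_char hh) hcs

-- the while-stack loop of A: head of the list = top of the Python stack
-- (Python appends each kept push at the end of the list; here it is consed, same order)
def pvLoopA (ascii_lines : List String) (blocked : Int × Int) (hill_char : String) :
    List (Int × Int) → PySem.Set (Int × Int) → PySem.Set (Int × Int)
  | [], seen => seen
  | c :: rest, seen =>
    if hseen : PySem.Set.contains seen c then pvLoopA ascii_lines blocked hill_char rest seen
    else if c = blocked then pvLoopA ascii_lines blocked hill_char rest seen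
    else if hh : is_hill_char_py ascii_lines c.1 c.2 hill_char then
      pvLoopA ascii_lines blocked hill_char
        ([((0 : Int), (-1 : Int)), (1, 0), (0, 1), (-1, 0)].foldl
          (fun st d =>
            if 0 ≤ c.1 + d.1 ∧ c.1 + d.1 < pvWidthA ascii_lines ∧
               0 ≤ c.2 + d.2 ∧ c.2 + d.2 < (ascii_lines.length : Int)
            then (c.1 + d.1, c.2 + d.2) :: st else st) rest)
        (PySem.Set.add seen c)
    else pvLoopA ascii_lines blocked hill_char rest seen
  termination_by stack seen => (pvMu ascii_lines hill_char seen, stack.length)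
  decreasing_by
  · exact Prod.Lex.right _ (by simp)
  · exact Prod.Lex.right _ (by simp)
  · exact Prod.Lex.left _ _ (pvMu_add_lt ascii_lines hill_char seen c hh (by simpa using hseen))
  · exact Prod.Lex.right _ (by simp)

def hill_reachable_without_cell_py (ascii_lines : List String) (start : Int × Int) (blocked : Int × Int) (hill_char : String) : List (Int × Int) :=
  pvLoopA ascii_lines blocked hill_char [start] PySem.Set.empty

-- ===== PORT B =====
def pvHillB (ascii_lines : List String) (width height : Int) (hill_char : String) (x y : Int) : Bool :=
  if 0 ≤ y ∧ y < height ∧ 0 ≤ x ∧ x < width then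
    let row := ((PySem.List.pyGet? ascii_lines y).getD "").toList
    let ch := if x < (row.length : Int) then (PySem.List.pyGet? row x).getD '.' else '.'
    hill_char.toList == [ch]
  else false

-- recursive flood fill of Source B; the fuel only makes the recursion structural
-- (chosen larger than the number of grid cells, the 0 branch is never reached)
def pvVisitB (ascii_lines : List String) (width height : Int) (blocked : Int × Int)
    (hill_char : String) : Nat → (Int × Int) → PySem.Set (Int × Int) → PySem.Set (Int × Int)
  | 0, _, seen => seen
  | Nat.succ f, c, seen =>
    if PySem.Set.contains seen c || c == blocked || !(pvHillB ascii_lines width height hill_char c.1 c.2)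
    then seen
    else
      let s0 := PySem.Set.add seen c
      let s1 := pvVisitB ascii_lines width height blocked hill_char f (c.1 - 1, c.2) s0
      let s2 := pvVisitB ascii_lines width height blocked hill_char f (c.1, c.2 + 1) s1
      let s3 := pvVisitB ascii_lines width height blocked hill_char f (c.1 + 1, c.2) s2
      pvVisitB ascii_lines width height blocked hill_char f (c.1, c.2 - 1) s3

def hill_reachable_without_cell_py_alt (ascii_lines : List String) (start : Int × Int) (blocked : Int × Int) (hill_char : String) : List (Int × Int) :=
  let height : Int := (ascii_lines.length : Int)
  let width : Int := PySem.List.maxD (ascii_lines.map (fun row => PySem.Str.len row)) (fun y => y) 0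
  pvVisitB ascii_lines width height blocked hill_char
    (width.toNat * height.toNat + 1) start PySem.Set.empty

-- ===== PRECONDITION & SPEC =====
def Spec_hill_reachable_without_cell_py (ascii_lines : List String) (start : Int × Int) (blocked : Int × Int) (hill_char : String) (out : List (Int × Int)) : Prop := out = hill_reachable_without_cell_py_alt ascii_lines start blocked hill_char
instance (ascii_lines : List String) (start : Int × Int) (blocked : Int × Int) (hill_char : String) (out : List (Int × Int)) : Decidable (Spec_hill_reachable_without_cell_py ascii_lines start blocked hill_char out) := by unfold Spec_hill_reachable_without_cell_py; infer_instance

-- ===== CLAIM (what is proved, stated in full; the proofs are below) =====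
def Claim_equal_hill_reachable_without_cell_py : Prop := ∀ (ascii_lines : List String) (start : Int × Int) (blocked : Int × Int) (hill_char : String), Dom_hill_reachable_without_cell_py ascii_lines start blocked hill_char → Spec_hill_reachable_without_cell_py ascii_lines start blocked hill_char (hill_reachable_without_cell_py ascii_lines start blocked hill_char)

-- ===== LEMMAS AND PROOFS =====

-- B's width equals A's width
lemma pvWidth_eq (ascii_lines : List String) :
    PySem.List.maxD (ascii_lines.map (fun row => PySem.Str.len row)) (fun y => y) 0
      = pvWidthA ascii_lines := by
  unfold pvWidthA
  have h : ∀ o : Option Int, o.getD 0 = (match o with | some m => m | none => 0) := by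
    intro o; cases o <;> rfl
  simp only [PySem.List.maxD, PySem.List.max?]
  exact h _

-- B's hill test equals A's is_hill_char when width/height are A's
lemma pvHill_eq (ascii_lines : List String) (hill_char : String) (x y : Int) :
    pvHillB ascii_lines (pvWidthA ascii_lines) (ascii_lines.length : Int) hill_char x y
      = is_hill_char_py ascii_lines x y hill_char := by
  unfold pvHillB is_hill_char_py
  dsimp only
  by_cases hin : 0 ≤ y ∧ y < (ascii_lines.length : Int) ∧ 0 ≤ x ∧ x < pvWidthA ascii_lines
  · rw [if_pos hin]
    have hguard : (y < 0 || y ≥ (ascii_lines.length : Int) || x < 0 || x ≥ pvWidthA ascii_lines) = false := by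
      simp only [Bool.or_eq_false_iff, decide_eq_false_iff_not, not_lt, not_le]
      omega
    rw [hguard]
    simp only [Bool.false_eq_true, if_false]
    set row := ((PySem.List.pyGet? ascii_lines y).getD "").toList with hrow
    have hx0 : 0 ≤ x := hin.2.2.1
    by_cases hxr : x < (row.length : Int)
    · rw [if_pos hxr]
      have hA : PySem.List.pyGet? (row ++ List.replicate ((pvWidthA ascii_lines).toNat - row.length) '.') x
          = some (row.getD x.toNat '.') := by
        rw [PySem.List.pyGet?_of_nonneg _ hx0]
        rw [List.getElem?_append_left (by omega)]
        rw [List.getElem?_eq_getElem (by omega)]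
        simp [List.getD, List.getElem?_eq_getElem (show x.toNat < row.length by omega)]
      rw [hA]
      have hB : (PySem.List.pyGet? row x).getD '.' = row.getD x.toNat '.' := by
        rw [PySem.List.pyGet?_of_nonneg _ hx0]
        simp [List.getD]
      rw [hB]
    · rw [if_neg hxr]
      have hxw : x.toNat < (pvWidthA ascii_lines).toNat := by omega
      have hrl : row.length ≤ x.toNat := by omega
      have hA : PySem.List.pyGet? (row ++ List.replicate ((pvWidthA ascii_lines).toNat - row.length) '.') x
          = some '.' := by
        rw [PySem.List.pyGet?_of_nonneg _ hx0]
        rw [List.getElem?_append_right hrl]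
        rw [List.getElem?_replicate]
        rw [if_pos (by omega)]
      rw [hA]
  · rw [if_neg hin]
    have hguard : (y < 0 || y ≥ (ascii_lines.length : Int) || x < 0 || x ≥ pvWidthA ascii_lines) = true := by
      simp only [Bool.or_eq_true, decide_eq_true_eq]
      omega
    rw [hguard]
    simp

-- visit only appends to seen
lemma pvVisitB_extend (ascii_lines : List String) (width height : Int) (blocked : Int × Int)
    (hill_char : String) (f : Nat) (c : Int × Int) (seen : PySem.Set (Int × Int)) :
    ∃ t, pvVisitB ascii_lines width height blocked hill_char f c seen = seen ++ t := by
  induction f generalizing c seen with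
  | zero => exact ⟨[], by simp [pvVisitB]⟩
  | succ f ih =>
    rw [pvVisitB]
    by_cases hc : (PySem.Set.contains seen c || c == blocked
        || !(pvHillB ascii_lines width height hill_char c.1 c.2)) = true
    · rw [if_pos hc]; exact ⟨[], by simp⟩
    · rw [if_neg hc]
      dsimp only
      obtain ⟨⟨hns, -⟩, -⟩ : (c ∉ seen ∧ ¬ c = blocked) ∧
          pvHillB ascii_lines width height hill_char c.1 c.2 = true := by simpa using hc
      rw [PySem.Set.add_of_not_mem hns]
      obtain ⟨t1, h1⟩ := ih (c.1 - 1, c.2) (seen ++ [c])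
      rw [h1]
      obtain ⟨t2, h2⟩ := ih (c.1, c.2 + 1) (seen ++ [c] ++ t1)
      rw [h2]
      obtain ⟨t3, h3⟩ := ih (c.1 + 1, c.2) (seen ++ [c] ++ t1 ++ t2)
      rw [h3]
      obtain ⟨t4, h4⟩ := ih (c.1, c.2 - 1) (seen ++ [c] ++ t1 ++ t2 ++ t3)
      rw [h4]
      exact ⟨[c] ++ t1 ++ t2 ++ t3 ++ t4, by simp⟩

lemma pvMu_append_le (ascii_lines : List String) (hill_char : String)
    (s t : List (Int × Int)) :
    pvMu ascii_lines hill_char (s ++ t) ≤ pvMu ascii_lines hill_char s := by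
  apply List.countP_mono_left
  intro x _ hx
  simp only [Bool.not_eq_true', List.elem_eq_contains, List.contains_eq_mem,
    decide_eq_false_iff_not, List.mem_append, not_or] at hx ⊢
  exact hx.1

-- main simulation lemma: popping c and handling it in A equals one recursive visit of B
lemma pvStep (ascii_lines : List String) (blocked : Int × Int) (hill_char : String)
    (f : Nat) (c : Int × Int) (rest : List (Int × Int)) (seen : PySem.Set (Int × Int))
    (hf : pvMu ascii_lines hill_char seen < f) :
    pvLoopA ascii_lines blocked hill_char (c :: rest) seen
      = pvLoopA ascii_lines blocked hill_char rest
          (pvVisitB ascii_lines (pvWidthA ascii_lines) (ascii_lines.length : Int) blocked hill_char f c seen) := by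
  induction f generalizing c rest seen with
  | zero => omega
  | succ f ih =>
    rw [pvVisitB]
    by_cases hseen : PySem.Set.contains seen c
    · have hmem : c ∈ seen := (PySem.Set.contains_iff seen c).mp hseen
      rw [pvLoopA, dif_pos hseen, if_pos (by simp [hmem])]
    · by_cases hb : c = blocked
      · rw [pvLoopA, dif_neg hseen, if_pos hb, if_pos (by simp [hb])]
      · by_cases hh : is_hill_char_py ascii_lines c.1 c.2 hill_char
        · -- visit case
          have hmem : c ∉ seen := fun hm => hseen ((PySem.Set.contains_iff seen c).mpr hm)
          have hcond : ¬ ((PySem.Set.contains seen c || c == blocked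
              || !(pvHillB ascii_lines (pvWidthA ascii_lines) (ascii_lines.length : Int) hill_char c.1 c.2)) = true) := by
            simp [hmem, hb, pvHill_eq, hh]
          rw [if_neg hcond]
          dsimp only
          rw [pvLoopA, dif_neg hseen, if_neg hb, dif_pos hh]
          simp only [List.foldl_cons, List.foldl_nil]
          have hstep : ∀ (nx ny : Int) (st : List (Int × Int)) (s : PySem.Set (Int × Int)),
              pvMu ascii_lines hill_char s < f →
              pvLoopA ascii_lines blocked hill_char
                (if 0 ≤ nx ∧ nx < pvWidthA ascii_lines ∧ 0 ≤ ny ∧ ny < (ascii_lines.length : Int)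
                 then (nx, ny) :: st else st) s
              = pvLoopA ascii_lines blocked hill_char st
                  (pvVisitB ascii_lines (pvWidthA ascii_lines) (ascii_lines.length : Int) blocked hill_char f (nx, ny) s) := by
            intro nx ny st s hfs
            by_cases hin : 0 ≤ nx ∧ nx < pvWidthA ascii_lines ∧ 0 ≤ ny ∧ ny < (ascii_lines.length : Int)
            · rw [if_pos hin]; exact ih (nx, ny) st s hfs
            · rw [if_neg hin]
              obtain ⟨g, rfl⟩ : ∃ g, f = g + 1 := ⟨f - 1, by omega⟩
              have hhb : pvHillB ascii_lines (pvWidthA ascii_lines) (ascii_lines.length : Int) hill_char nx ny = false := by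
                unfold pvHillB
                rw [if_neg (by tauto)]
              rw [pvVisitB, if_pos (by simp [hhb])]
          have hns : PySem.Set.contains seen c = false := by
            simpa using hseen
          have h0 : pvMu ascii_lines hill_char (PySem.Set.add seen c) < f := by
            have := pvMu_add_lt ascii_lines hill_char seen c hh hns
            omega
          rw [PySem.Set.add_of_not_mem hmem]
          rw [PySem.Set.add_of_not_mem hmem] at h0
          -- neighbour coordinates, A's c+d form rewritten to B's form
          rw [show c.1 + (0:Int) = c.1 from by ring, show c.2 + (0:Int) = c.2 from by ring,
              show c.1 + (-1:Int) = c.1 - 1 from by ring,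
              show c.2 + (-1:Int) = c.2 - 1 from by ring]
          have key : ∀ (s' : PySem.Set (Int × Int)), pvMu ascii_lines hill_char s' < f →
              ∀ n : Int × Int, pvMu ascii_lines hill_char
                (pvVisitB ascii_lines (pvWidthA ascii_lines) (ascii_lines.length : Int) blocked hill_char f n s') < f := by
            intro s' hs' n
            obtain ⟨t, ht⟩ := pvVisitB_extend ascii_lines (pvWidthA ascii_lines)
              (ascii_lines.length : Int) blocked hill_char f n s'
            rw [ht]
            exact lt_of_le_of_lt (pvMu_append_le ascii_lines hill_char s' t) hs'
          -- peel the four pushed neighbours, top of stack first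
          rw [hstep (c.1 - 1) c.2 _ _ h0]
          rw [hstep c.1 (c.2 + 1) _ _ (key _ h0 _)]
          rw [hstep (c.1 + 1) c.2 _ _ (key _ (key _ h0 _) _)]
          rw [hstep c.1 (c.2 - 1) _ _ (key _ (key _ (key _ h0 _) _) _)]
        · rw [pvLoopA, dif_neg hseen, if_neg hb, dif_neg hh,
            if_pos (by simp [pvHill_eq, hh])]

-- ===== VERDICT (by name: the statement is the Claim_ definition above) =====
theorem hill_reachable_without_cell_py_spec : Claim_equal_hill_reachable_without_cell_py := by
  unfold Claim_equal_hill_reachable_without_cell_py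
  intro ascii_lines start blocked hill_char _hdom
  unfold Spec_hill_reachable_without_cell_py
  unfold hill_reachable_without_cell_py hill_reachable_without_cell_py_alt
  dsimp only
  rw [pvWidth_eq, Int.toNat_natCast]
  have hall : (pvAllCells ascii_lines).length
      = ascii_lines.length * (pvWidthA ascii_lines).toNat := by
    unfold pvAllCells
    simp [List.length_flatMap, List.map_const', List.sum_replicate, smul_eq_mul]
  have hmu : pvMu ascii_lines hill_char PySem.Set.empty
      < (pvWidthA ascii_lines).toNat * ascii_lines.length + 1 := by
    unfold pvMu
    have h1 : (pvHillCells ascii_lines hill_char).countP (fun a => !(List.elem a PySem.Set.empty))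
        ≤ (pvHillCells ascii_lines hill_char).length := List.countP_le_length
    have h2 : (pvHillCells ascii_lines hill_char).length ≤ (pvAllCells ascii_lines).length := by
      unfold pvHillCells
      exact List.length_filter_le _ _
    rw [hall] at h2
    have := Nat.mul_comm ascii_lines.length (pvWidthA ascii_lines).toNat
    omega
  rw [pvStep ascii_lines blocked hill_char _ start [] PySem.Set.empty hmu]
  rw [pvLoopA]
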